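-- pv_equiv track=rewrite | github.com/sun-hainan/Python | 编译器优化/copy_propagation.py | _transitive_vars
-- ===== SOURCE A (Python) =====
-- from typing import List, Dict, Set, Optional, Tuple
--
-- def _transitive_vars(var: str, copy_map: Dict[str, str]) -> Set[str]:
--     """获取通过复制链传递依赖的所有变量"""
--     visited = set()
--     stack = [var]
--     while stack:
--         current = stack.pop()
--         if current in visited:
--             continue
--         visited.add(current)
--         if current in copy_map:
--             stack.append(copy_map[current])
--     visited.discard(var)  # 不包含自己
--     return visited
-- ===== SOURCE B (Python) =====
-- def _transitive_vars(var: str, copy_map: dict) -> set: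
--     """Fixed-point saturation: repeatedly widen the reachable set with the
--     copy targets of everything already reached, enough rounds to saturate."""
--     reach = {var}
--     for _ in range(len(copy_map) + 1):
--         reach = reach | {copy_map[x] for x in reach if x in copy_map}
--     reach.discard(var)
--     return reach
-- ===== Notes on version B (the rewrite author's own statement) =====
-- stated objective: alternative
-- what changed: Replaces the stack-based single-chain walk by fixed-point set saturation: len(copy_map)+1 staged rounds, each mapping the whole reached set through copy_map and unioning, instead of following one pointer with pop/push/continue.
import Mathlib
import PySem

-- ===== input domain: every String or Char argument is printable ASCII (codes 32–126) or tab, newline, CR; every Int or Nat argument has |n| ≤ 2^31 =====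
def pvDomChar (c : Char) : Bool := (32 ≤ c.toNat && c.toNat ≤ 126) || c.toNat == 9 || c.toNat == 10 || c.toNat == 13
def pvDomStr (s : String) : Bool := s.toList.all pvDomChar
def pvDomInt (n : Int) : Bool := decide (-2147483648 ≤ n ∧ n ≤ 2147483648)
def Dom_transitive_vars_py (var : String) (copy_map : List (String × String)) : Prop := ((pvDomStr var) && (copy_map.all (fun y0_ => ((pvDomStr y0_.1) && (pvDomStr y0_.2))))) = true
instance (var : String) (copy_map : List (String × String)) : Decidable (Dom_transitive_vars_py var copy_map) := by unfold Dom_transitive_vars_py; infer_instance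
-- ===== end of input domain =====

-- B replaces A's explicit stack walk along the copy chain by fixed-point set
-- saturation (len(copy_map)+1 rounds of mapping the whole reached set through
-- copy_map and unioning); objective: alternative algorithm, same results.

-- ===== PORT A =====
-- Literal port of A's while-loop: pop the last stack element, skip if visited,
-- else add and push copy_map[current]. Fuel copy_map.length + 2 bounds the pops
-- (at most length+1 distinct visits plus one terminating pop).
def pvLoopA (copy_map : PySem.Dict String String) : Nat → List String → PySem.Set String → PySem.Set String
  | 0, _, visited => visited
  | _ + 1, [], visited => visited
  | f + 1, s :: ss, visited =>
      match PySem.List.pop? (s :: ss) (-1) with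
      | none => visited
      | some (current, rest) =>
        if PySem.Set.contains visited current then
          pvLoopA copy_map f rest visited
        else
          let visited' := PySem.Set.add visited current
          match PySem.Dict.get? copy_map current with
          | some v => pvLoopA copy_map f (rest ++ [v]) visited'
          | none => pvLoopA copy_map f rest visited'

def transitive_vars_py (var : String) (copy_map : List (String × String)) : List String :=
  PySem.Set.discard (pvLoopA (PySem.Dict.ofList copy_map) (copy_map.length + 2) [var] PySem.Set.empty) var

-- ===== PORT B =====
-- One saturation round: reach | {copy_map[x] for x in reach if x in copy_map}.
def pvStep (copy_map : PySem.Dict String String) (reach : PySem.Set String) : PySem.Set String :=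
  PySem.Set.union reach (PySem.Set.ofList (reach.filterMap (fun x => PySem.Dict.get? copy_map x)))

def transitive_vars_py_alt (var : String) (copy_map : List (String × String)) : List String :=
  let cm := PySem.Dict.ofList copy_map
  let reach := (List.range (copy_map.length + 1)).foldl (fun r _ => pvStep cm r) (PySem.Set.add PySem.Set.empty var)
  PySem.Set.discard reach var

-- ===== PRECONDITION & SPEC =====
def Spec_transitive_vars_py (var : String) (copy_map : List (String × String)) (out : List String) : Prop := out = transitive_vars_py_alt var copy_map
instance (var : String) (copy_map : List (String × String)) (out : List String) : Decidable (Spec_transitive_vars_py var copy_map out) := by unfold Spec_transitive_vars_py; infer_instance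

-- ===== CLAIM (what is proved, stated in full; the proofs are below) =====
def Claim_equal_transitive_vars_py : Prop := ∀ (var : String) (copy_map : List (String × String)), Dom_transitive_vars_py var copy_map → Spec_transitive_vars_py var copy_map (transitive_vars_py var copy_map)

-- ===== LEMMAS AND PROOFS =====

-- The single-pointer chain walk both ports reduce to (proof device only).
def pvChain (copy_map : PySem.Dict String String) : Nat → Option String → PySem.Set String → PySem.Set String
  | 0, _, visited => visited
  | _ + 1, none, visited => visited
  | f + 1, some current, visited =>
      if PySem.Set.contains visited current then visited
      else pvChain copy_map f (PySem.Dict.get? copy_map current) (PySem.Set.add visited current)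

theorem pvLoopA_nil (cm : PySem.Dict String String) (f : Nat) (v : PySem.Set String) :
    pvLoopA cm f [] v = v := by cases f <;> rfl

theorem pvChain_none (cm : PySem.Dict String String) (f : Nat) (v : PySem.Set String) :
    pvChain cm f none v = v := by cases f <;> rfl

-- A's stack walk equals the chain walk (the stack never holds two elements).
theorem pvLoopA_eq_chain (cm : PySem.Dict String String) (f : Nat) :
    ∀ (c : String) (v : PySem.Set String),
      pvLoopA cm f [c] v = pvChain cm f (some c) v := by
  induction f with
  | zero => intro c v; rfl
  | succ f ih =>
    intro c v
    show (match PySem.List.pop? [c] (-1) with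
      | none => v
      | some (current, rest) =>
        if PySem.Set.contains v current then pvLoopA cm f rest v
        else
          let v' := PySem.Set.add v current
          match PySem.Dict.get? cm current with
          | some w => pvLoopA cm f (rest ++ [w]) v'
          | none => pvLoopA cm f rest v') = _
    have hpop : PySem.List.pop? [c] (-1) = some (c, []) := by
      simp [PySem.List.pop?, PySem.List.pyIdx?]
    rw [hpop]
    have hb1 : pvChain cm (f + 1) (some c) v
        = if PySem.Set.contains v c then v
          else pvChain cm f (PySem.Dict.get? cm c) (PySem.Set.add v c) := rfl
    by_cases hc : PySem.Set.contains v c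
    · simp only [hc, if_true, pvLoopA_nil, hb1]
    · simp only [hc]
      show (match PySem.Dict.get? cm c with
        | some w => pvLoopA cm f ([] ++ [w]) (PySem.Set.add v c)
        | none => pvLoopA cm f [] (PySem.Set.add v c)) = pvChain cm (f + 1) (some c) v
      rw [hb1, if_neg hc]
      cases hg : PySem.Dict.get? cm c with
      | some w => simpa using ih w (PySem.Set.add v c)
      | none => simp [pvLoopA_nil, pvChain_none]

-- Folding Set.add over values that are already present is a no-op.
theorem pvFoldAdd_noop (l : List String) :
    ∀ (acc : PySem.Set String), (∀ y ∈ l, y ∈ acc) →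
      l.foldl PySem.Set.add acc = acc := by
  induction l with
  | nil => intro acc _; rfl
  | cons x l ih =>
    intro acc h
    have hx : PySem.Set.add acc x = acc := PySem.Set.add_of_mem (h x (by simp))
    simp only [List.foldl_cons, hx]
    exact ih acc (fun y hy => h y (by simp [hy]))

-- Folding Set.add over values all in acc ∪ {c}, with some occurrence of c ∉ acc,
-- appends exactly c.
theorem pvFoldAdd_one (c : String) (l : List String) :
    ∀ (acc : PySem.Set String), c ∉ acc →
      (∀ y ∈ l, y ∈ acc ∨ y = c) → c ∈ l →
      l.foldl PySem.Set.add acc = acc ++ [c] := by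
  induction l with
  | nil => intro acc _ _ h; simp at h
  | cons x l ih =>
    intro acc hc h hcl
    by_cases hxc : x = c
    · subst hxc
      have hx : PySem.Set.add acc x = acc ++ [x] := PySem.Set.add_of_not_mem hc
      simp only [List.foldl_cons, hx]
      refine pvFoldAdd_noop l (acc ++ [x]) (fun y hy => ?_)
      rcases h y (by simp [hy]) with h' | h'
      · simp [h']
      · simp [h']
    · have hx : PySem.Set.add acc x = acc := by
        refine PySem.Set.add_of_mem ?_
        rcases h x (by simp) with h' | h'
        · exact h'
        · exact absurd h' hxc
      simp only [List.foldl_cons, hx]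
      have hcl' : c ∈ l := by
        rcases List.mem_cons.mp hcl with h' | h'
        · exact absurd h'.symm hxc
        · exact h'
      exact ih acc hc (fun y hy => h y (by simp [hy])) hcl'

-- pvStep as a fold of Set.add over the successor values.
theorem pvUpdate_ofList (s : PySem.Set String) (l : List String) :
    PySem.Set.update s (PySem.Set.ofList l) = PySem.Set.update s l := by
  induction l using List.reverseRecOn with
  | nil => rfl
  | append_singleton l x ih =>
    rw [PySem.Set.ofList_append_singleton, PySem.Set.add_eq_ite]
    by_cases hx : x ∈ PySem.Set.ofList l
    · rw [if_pos hx, ih, PySem.Set.update_append]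
      have hx' : x ∈ PySem.Set.update s l := by
        rw [PySem.Set.mem_update]
        exact Or.inr ((PySem.Set.mem_ofList _ _).mp hx)
      exact (PySem.Set.add_of_mem hx').symm
    · rw [if_neg hx, PySem.Set.update_append, PySem.Set.update_append, ih]

theorem pvStep_eq_foldl (cm : PySem.Dict String String) (reach : PySem.Set String) :
    pvStep cm reach
      = (reach.filterMap (fun x => PySem.Dict.get? cm x)).foldl PySem.Set.add reach := by
  show PySem.Set.update reach (PySem.Set.ofList _) = _
  rw [pvUpdate_ofList]
  rfl

-- If every successor of v is already in v, one saturation round is a no-op.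
theorem pvStep_closed (cm : PySem.Dict String String) (v : PySem.Set String)
    (h : ∀ x ∈ v, ∀ y, PySem.Dict.get? cm x = some y → y ∈ v) :
    pvStep cm v = v := by
  rw [pvStep_eq_foldl]
  refine pvFoldAdd_noop _ v (fun y hy => ?_)
  rcases (List.mem_filterMap).mp hy with ⟨x, hx, hxy⟩
  exact h x hx y hxy

-- One saturation round applied to a partial chain walk advances the walk by one step.
theorem pvStep_chain (cm : PySem.Dict String String) (f : Nat) :
    ∀ (c : String) (v : PySem.Set String),
      (∀ x ∈ v, ∀ y, PySem.Dict.get? cm x = some y → y ∈ v ∨ y = c) →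
      (c ∈ v ∨ ∃ x ∈ v, PySem.Dict.get? cm x = some c) →
      pvStep cm (pvChain cm f (some c) v) = pvChain cm (f + 1) (some c) v := by
  induction f with
  | zero =>
    intro c v h hex
    show pvStep cm v = pvChain cm 1 (some c) v
    by_cases hc : c ∈ v
    · have hcb : PySem.Set.contains v c = true := (PySem.Set.contains_iff _ _).mpr hc
      have hclosed : pvStep cm v = v := by
        refine pvStep_closed cm v (fun x hx y hxy => ?_)
        rcases h x hx y hxy with h' | h'
        · exact h'
        · exact h' ▸ hc
      rw [hclosed]
      show _ = if PySem.Set.contains v c then v else _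
      rw [hcb]; rfl
    · have hcb : PySem.Set.contains v c = false := by
        cases hcb : PySem.Set.contains v c
        · rfl
        · exact absurd ((PySem.Set.contains_iff _ _).mp hcb) hc
      rcases hex with h' | ⟨x, hx, hxc⟩
      · exact absurd h' hc
      · have hstep : pvStep cm v = v ++ [c] := by
          rw [pvStep_eq_foldl]
          refine pvFoldAdd_one c _ v hc (fun y hy => ?_) ?_
          · rcases (List.mem_filterMap).mp hy with ⟨z, hz, hzy⟩
            exact h z hz y hzy
          · exact (List.mem_filterMap).mpr ⟨x, hx, hxc⟩
        rw [hstep]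
        show _ = if PySem.Set.contains v c then v
                 else pvChain cm 0 (PySem.Dict.get? cm c) (PySem.Set.add v c)
        rw [hcb]
        show _ = PySem.Set.add v c
        rw [PySem.Set.add_of_not_mem hc]
  | succ f ih =>
    intro c v h hex
    by_cases hc : c ∈ v
    · have hcb : PySem.Set.contains v c = true := (PySem.Set.contains_iff _ _).mpr hc
      have h1 : pvChain cm (f + 1) (some c) v = v := by
        show (if PySem.Set.contains v c then v else _) = v
        rw [hcb]; rfl
      have h2 : pvChain cm (f + 2) (some c) v = v := by
        show (if PySem.Set.contains v c then v else _) = v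
        rw [hcb]; rfl
      rw [h1, h2]
      refine pvStep_closed cm v (fun x hx y hxy => ?_)
      rcases h x hx y hxy with h' | h'
      · exact h'
      · exact h' ▸ hc
    · have hcb : PySem.Set.contains v c = false := by
        cases hcb : PySem.Set.contains v c
        · rfl
        · exact absurd ((PySem.Set.contains_iff _ _).mp hcb) hc
      have hv' : PySem.Set.add v c = v ++ [c] := PySem.Set.add_of_not_mem hc
      have h1 : pvChain cm (f + 1) (some c) v
          = pvChain cm f (PySem.Dict.get? cm c) (v ++ [c]) := by
        show (if PySem.Set.contains v c then v else _) = _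
        rw [hcb, hv']; simp
      have h2 : pvChain cm (f + 2) (some c) v
          = pvChain cm (f + 1) (PySem.Dict.get? cm c) (v ++ [c]) := by
        show (if PySem.Set.contains v c then v else _) = _
        rw [hcb, hv']; simp
      rw [h1, h2]
      have hmem : ∀ x ∈ v ++ [c], ∀ y, PySem.Dict.get? cm x = some y →
          y ∈ v ++ [c] ∨ PySem.Dict.get? cm c = some y := by
        intro x hx y hxy
        rcases List.mem_append.mp hx with hx' | hx'
        · rcases h x hx' y hxy with h' | h'
          · exact Or.inl (List.mem_append.mpr (Or.inl h'))
          · exact Or.inl (h' ▸ List.mem_append.mpr (Or.inr (by simp)))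
        · have : x = c := by simpa using hx'
          exact Or.inr (this ▸ hxy)
      cases hg : PySem.Dict.get? cm c with
      | some d =>
        refine ih d (v ++ [c]) (fun x hx y hxy => ?_) ?_
        · rcases hmem x hx y hxy with h' | h'
          · exact Or.inl h'
          · right; rw [hg] at h'; exact (Option.some.injEq _ _ ▸ h').symm ▸ rfl
        · exact Or.inr ⟨c, List.mem_append.mpr (Or.inr (by simp)), hg⟩
      | none =>
        rw [pvChain_none, pvChain_none]
        refine pvStep_closed cm (v ++ [c]) (fun x hx y hxy => ?_)
        rcases hmem x hx y hxy with h' | h'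
        · exact h'
        · rw [hg] at h'; exact absurd h' (by simp)

-- The start state ({var}, no pending existence) still advances when fuel ≥ 1.
theorem pvStep_chain_start (cm : PySem.Dict String String) (f : Nat) (c : String)
    (v : PySem.Set String)
    (h : ∀ x ∈ v, ∀ y, PySem.Dict.get? cm x = some y → y ∈ v ∨ y = c) :
    pvStep cm (pvChain cm (f + 1) (some c) v) = pvChain cm (f + 2) (some c) v := by
  by_cases hc : c ∈ v
  · exact pvStep_chain cm (f + 1) c v h (Or.inl hc)
  · have hcb : PySem.Set.contains v c = false := by
      cases hcb : PySem.Set.contains v c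
      · rfl
      · exact absurd ((PySem.Set.contains_iff _ _).mp hcb) hc
    have hv' : PySem.Set.add v c = v ++ [c] := PySem.Set.add_of_not_mem hc
    have h1 : pvChain cm (f + 1) (some c) v
        = pvChain cm f (PySem.Dict.get? cm c) (v ++ [c]) := by
      show (if PySem.Set.contains v c then v else _) = _
      rw [hcb, hv']; simp
    have h2 : pvChain cm (f + 2) (some c) v
        = pvChain cm (f + 1) (PySem.Dict.get? cm c) (v ++ [c]) := by
      show (if PySem.Set.contains v c then v else _) = _
      rw [hcb, hv']; simp
    rw [h1, h2]
    have hmem : ∀ x ∈ v ++ [c], ∀ y, PySem.Dict.get? cm x = some y →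
        y ∈ v ++ [c] ∨ PySem.Dict.get? cm c = some y := by
      intro x hx y hxy
      rcases List.mem_append.mp hx with hx' | hx'
      · rcases h x hx' y hxy with h' | h'
        · exact Or.inl (List.mem_append.mpr (Or.inl h'))
        · exact Or.inl (h' ▸ List.mem_append.mpr (Or.inr (by simp)))
      · have : x = c := by simpa using hx'
        exact Or.inr (this ▸ hxy)
    cases hg : PySem.Dict.get? cm c with
    | some d =>
      refine pvStep_chain cm f d (v ++ [c]) (fun x hx y hxy => ?_) ?_
      · rcases hmem x hx y hxy with h' | h'
        · exact Or.inl h'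
        · right; rw [hg] at h'; exact (Option.some.injEq _ _ ▸ h').symm ▸ rfl
      · exact Or.inr ⟨c, List.mem_append.mpr (Or.inr (by simp)), hg⟩
    | none =>
      rw [pvChain_none, pvChain_none]
      refine pvStep_closed cm (v ++ [c]) (fun x hx y hxy => ?_)
      rcases hmem x hx y hxy with h' | h'
      · exact h'
      · rw [hg] at h'; exact absurd h' (by simp)

-- r saturation rounds from {var} equal the chain walk with fuel r + 1.
theorem pvRounds_eq_chain (cm : PySem.Dict String String) (var : String) :
    ∀ r : Nat, (List.range r).foldl (fun a _ => pvStep cm a) [var]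
      = pvChain cm (r + 1) (some var) [] := by
  intro r
  induction r with
  | zero =>
    show [var] = pvChain cm 1 (some var) []
    show _ = if PySem.Set.contains ([] : PySem.Set String) var then [] else _
    rfl
  | succ r ih =>
    rw [List.range_succ, List.foldl_append]
    show pvStep cm ((List.range r).foldl (fun a _ => pvStep cm a) [var]) = _
    rw [ih]
    exact pvStep_chain_start cm r var [] (by simp)

-- ===== VERDICT (by name: the statement is the Claim_ definition above) =====
theorem transitive_vars_py_spec : Claim_equal_transitive_vars_py := by
  intro var copy_map _
  unfold Spec_transitive_vars_py transitive_vars_py transitive_vars_py_alt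
  rw [pvLoopA_eq_chain]
  show PySem.Set.discard (pvChain (PySem.Dict.ofList copy_map) (copy_map.length + 1 + 1) (some var) []) var
      = PySem.Set.discard ((List.range (copy_map.length + 1)).foldl
          (fun a _ => pvStep (PySem.Dict.ofList copy_map) a) [var]) var
  rw [pvRounds_eq_chain]
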